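-- pv_equiv track=rewrite | github.com/manibatra/sectiongpt | data_collection.py | extract_heading_sections
-- ===== SOURCE A (Python) =====
-- def extract_heading_sections(title, description, content: str) -> list:
--     sections = []
--     lines = content.splitlines()
--     section_content = []
--     section_heading = None
--     in_code_block = False
--     has_heading = False
--     all_section_headings = []
--
--     for line in lines:
--         if line.strip() == '```':
--             in_code_block = not in_code_block
--
--         if not in_code_block:
--             if line.startswith('#'):
--                 has_heading = True
--                 if section_heading:
--                     # add title and description as prefix to improve context matching
--                     all_section_headings.append(section_heading)
--                     section_content = section_content
--                     section_text = '\n'.join(section_content).strip()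
--                     sections.append((section_heading, section_text))
--                 section_heading = line.strip('#').strip()
--                 section_content = []
--             else:
--                 section_content.append(line)
--         else:
--             section_content.append(line)
--
--     if section_heading:
--         # add title and description as prefix to improve context matching
--         # all_section_headings.append(section_heading)
--         # section_content = [title, description] + section_content
--         section_text = '\n'.join(section_content).strip()
--         sections.append((section_heading, section_text))
--
--     if not has_heading:
--         section_heading = title + ' ' + description
--         section_text = '\n'.join(lines).strip()
--         sections.append((section_heading, section_text))
--
--     for idx, (heading, section_text) in enumerate(sections):
--         # section_content = [title, description] + all_section_headings + section_text.splitlines()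
--         section_content = section_text.splitlines()
--         updated_section_text = '\n'.join(section_content).strip()
--         sections[idx] = (heading, updated_section_text)
--
--     return sections
-- ===== SOURCE B (Python) =====
-- def _split_at_heading(lines):
--     """Return (prefix, suffix) where suffix starts at the first heading line
--     (a '#'-line outside any ``` code block), or (lines, []) if there is none."""
--     in_code = False
--     for i, line in enumerate(lines):
--         if line.strip() == '```':
--             in_code = not in_code
--         elif not in_code and line.startswith('#'):
--             return lines[:i], lines[i:]
--     return lines, []
--
--
-- def extract_heading_sections(title, description, content: str) -> list:
--     lines = content.splitlines()
--     _, rest = _split_at_heading(lines)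
--     if not rest:
--         return [(title + ' ' + description, '\n'.join(lines).strip())]
--     sections = []
--     while rest:
--         heading = rest[0].strip('#').strip()
--         body, rest = _split_at_heading(rest[1:])
--         if heading:
--             sections.append((heading, '\n'.join(body).strip()))
--     return sections
-- ===== Notes on version B (the rewrite author's own statement) =====
-- stated objective: simpler
-- what changed: A's single accumulator state machine (six mutable variables, an end-of-loop flush, and a final splitlines/join normalization pass that is a no-op) is replaced by a splitter-driven decomposition: a helper cuts the line list at the next heading outside a code fence, the main loop repeatedly takes one heading plus its body, and the redundant normalization pass is dropped.
import Mathlib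
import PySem

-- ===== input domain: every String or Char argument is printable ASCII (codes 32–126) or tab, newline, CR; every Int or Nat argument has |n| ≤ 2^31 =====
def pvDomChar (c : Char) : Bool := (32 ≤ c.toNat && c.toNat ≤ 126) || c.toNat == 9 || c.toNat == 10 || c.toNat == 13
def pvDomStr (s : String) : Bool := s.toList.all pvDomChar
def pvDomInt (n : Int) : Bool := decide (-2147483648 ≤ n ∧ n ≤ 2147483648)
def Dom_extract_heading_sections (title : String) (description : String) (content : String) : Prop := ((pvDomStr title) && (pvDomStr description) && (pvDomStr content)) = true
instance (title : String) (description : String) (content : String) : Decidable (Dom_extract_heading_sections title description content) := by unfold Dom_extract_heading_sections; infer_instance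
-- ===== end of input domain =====

-- B replaces A's six-variable accumulator state machine (with end-of-loop flush and a no-op
-- normalization pass) by a split-at-next-heading helper driving a simple section loop (objective: simpler).

-- ===== PORT A =====
-- one loop iteration of A over state (sections, section_content, section_heading, in_code_block, has_heading, all_section_headings)
def ehsStep (st : List (String × String) × List String × Option String × Bool × Bool × List String)
    (line : String) : List (String × String) × List String × Option String × Bool × Bool × List String :=
  let (sections, section_content, section_heading, in_code_block, has_heading, all_headings) := st
  let in_code_block := if PySem.Str.strip line == "```" then !in_code_block else in_code_block
  if !in_code_block then
    if PySem.Str.startswith line "#" then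
      -- heading found
      let has_heading := true
      let (sections, all_headings) :=
        match section_heading with
        | some sh =>
          if sh ≠ "" then
            (sections ++ [(sh, PySem.Str.strip (PySem.Str.join "\n" section_content))], all_headings ++ [sh])
          else (sections, all_headings)
        | none => (sections, all_headings)
      (sections, [], some (PySem.Str.strip (PySem.Str.stripChars line "#")), in_code_block, has_heading, all_headings)
    else
      (sections, section_content ++ [line], section_heading, in_code_block, has_heading, all_headings)
  else
    (sections, section_content ++ [line], section_heading, in_code_block, has_heading, all_headings)

def extract_heading_sections (title : String) (description : String) (content : String) : List (String × String) :=
  let lines := PySem.Str.splitlines content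
  let st := lines.foldl ehsStep ([], [], none, false, false, [])
  let (sections, section_content, section_heading, _, has_heading, _) := st
  let sections :=
    match section_heading with
    | some sh =>
      if sh ≠ "" then sections ++ [(sh, PySem.Str.strip (PySem.Str.join "\n" section_content))]
      else sections
    | none => sections
  let sections :=
    if !has_heading then
      sections ++ [(title ++ " " ++ description, PySem.Str.strip (PySem.Str.join "\n" lines))]
    else sections
  -- final in-place rewrite loop of A (index assignment over enumerate = a map)
  sections.map (fun p => (p.1, PySem.Str.strip (PySem.Str.join "\n" (PySem.Str.splitlines p.2))))

-- ===== PORT B =====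
-- _split_at_heading: (prefix, suffix) with suffix starting at the first heading line outside a ``` fence
def ehsSplitAtHeading : Bool → List String → List String × List String
  | _, [] => ([], [])
  | in_code, line :: rest =>
    if PySem.Str.strip line == "```" then
      let p := ehsSplitAtHeading (!in_code) rest
      (line :: p.1, p.2)
    else if !in_code && PySem.Str.startswith line "#" then
      ([], line :: rest)
    else
      let p := ehsSplitAtHeading in_code rest
      (line :: p.1, p.2)

-- termination fact for the section loop below (the suffix is no longer than the input)
theorem ehsSplit_len (ic : Bool) (xs : List String) :
    (ehsSplitAtHeading ic xs).2.length ≤ xs.length := by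
  induction xs generalizing ic with
  | nil => simp [ehsSplitAtHeading]
  | cons l t ih =>
    simp only [ehsSplitAtHeading]
    split_ifs <;> simp <;> exact le_trans (ih _) (Nat.le_succ _)

-- the `while rest:` loop of B
def ehsLoop : List String → List (String × String)
  | [] => []
  | l :: t =>
    let heading := PySem.Str.strip (PySem.Str.stripChars l "#")
    let p := ehsSplitAtHeading false t
    (if heading ≠ "" then [(heading, PySem.Str.strip (PySem.Str.join "\n" p.1))] else []) ++ ehsLoop p.2
termination_by xs => xs.length
decreasing_by simpa using Nat.lt_succ_of_le (ehsSplit_len false t)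

def extract_heading_sections_alt (title : String) (description : String) (content : String) : List (String × String) :=
  let lines := PySem.Str.splitlines content
  let rest := (ehsSplitAtHeading false lines).2
  if rest = [] then
    [(title ++ " " ++ description, PySem.Str.strip (PySem.Str.join "\n" lines))]
  else
    ehsLoop rest

-- ===== PRECONDITION & SPEC =====
def Spec_extract_heading_sections (title : String) (description : String) (content : String) (out : List (String × String)) : Prop := out = extract_heading_sections_alt title description content
instance (title : String) (description : String) (content : String) (out : List (String × String)) : Decidable (Spec_extract_heading_sections title description content out) := by unfold Spec_extract_heading_sections; infer_instance

-- ===== CLAIM (what is proved, stated in full; the proofs are below) =====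
def Claim_equal_extract_heading_sections : Prop := ∀ (title : String) (description : String) (content : String), Dom_extract_heading_sections title description content → Spec_extract_heading_sections title description content (extract_heading_sections title description content)

-- ===== LEMMAS AND PROOFS =====

-- proof-side shorthands
def ehsJ (b : List String) : String := PySem.Str.strip (PySem.Str.join "\n" b)
def ehsH (l : String) : String := PySem.Str.strip (PySem.Str.stripChars l "#")
def ehsNorm (p : String × String) : String × String :=
  (p.1, PySem.Str.strip (PySem.Str.join "\n" (PySem.Str.splitlines p.2)))
-- the "flush" A performs after its loop
def ehsFlush (st : List (String × String) × List String × Option String × Bool × Bool × List String) :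
    List (String × String) :=
  match st.2.2.1 with
  | some sh => if sh ≠ "" then st.1 ++ [(sh, ehsJ st.2.1)] else st.1
  | none => st.1
-- the line-break predicate of PySem.Chars.splitlines
def ehsIsB (c : Char) : Bool :=
  have n := c.toNat
  decide (n = 10) || decide (n = 13) || decide (n = 11) || decide (n = 12) || decide (n = 28) ||
    decide (n = 29) || decide (n = 30) || decide (n = 133) || decide (n = 8232) || decide (n = 8233)

-- ---- string facts ----

theorem ehs_prefix_head {l₁ l₂ : List Char} (h : l₁ <+: l₂) (hne : l₁ ≠ []) : l₁.head? = l₂.head? := by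
  obtain ⟨t, rfl⟩ := h
  cases l₁ with
  | nil => exact absurd rfl hne
  | cons a l => simp

theorem ehs_rstrip_prefix (u : List Char) : PySem.Chars.rstrip u <+: u := by
  have h := List.dropWhile_suffix (l := u.reverse) PySem.Chars.isspace
  have := List.reverse_prefix.mpr h
  simpa [PySem.Chars.rstrip] using this

theorem ehs_strip_head_hash (t : List Char) : ∃ r, PySem.Chars.strip ('#' :: t) = '#' :: r := by
  have hsp : PySem.Chars.isspace '#' = false := by decide
  have hl : PySem.Chars.lstrip ('#' :: t) = '#' :: t := by
    simp [PySem.Chars.lstrip, List.dropWhile, hsp]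
  simp only [PySem.Chars.strip, hl, PySem.Chars.rstrip]
  rw [List.reverse_cons, List.dropWhile_append]
  split
  · exact ⟨[], by simp [List.dropWhile, hsp]⟩
  · exact ⟨(List.dropWhile PySem.Chars.isspace t.reverse).reverse, by simp⟩

-- a heading line (startswith '#') is never the ``` fence toggle
theorem ehs_hash_not_fence (l : String) (h : PySem.Str.startswith l "#" = true) :
    (PySem.Str.strip l == "```") = false := by
  have hpre : ('#' :: ([] : List Char)) <+: l.toList := by
    have := h
    simp only [PySem.Str.startswith] at this
    exact List.isPrefixOf_iff_prefix.mp this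
  obtain ⟨t, ht⟩ := hpre
  simp only [List.cons_append, List.nil_append] at ht
  apply beq_eq_false_iff_ne.mpr
  intro hc
  have h2 : (PySem.Str.strip l).toList = "```".toList := by rw [hc]
  obtain ⟨r, hr⟩ := ehs_strip_head_hash t
  rw [PySem.Str.strip] at h2
  rw [String.toList_ofList, ← ht, hr] at h2
  simp at h2

-- contrapositive form: a fence line never starts with '#'
theorem ehs_fence_not_hash (l : String) (h : (PySem.Str.strip l == "```") = true) :
    PySem.Str.startswith l "#" = false := by
  by_contra hx
  have := ehs_hash_not_fence l (by simpa using hx)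
  rw [this] at h
  exact absurd h (by simp)

-- ---- splitter facts ----

theorem ehsSplit_append (ic : Bool) (xs : List String) :
    (ehsSplitAtHeading ic xs).1 ++ (ehsSplitAtHeading ic xs).2 = xs := by
  induction xs generalizing ic with
  | nil => simp [ehsSplitAtHeading]
  | cons l t ih =>
    simp only [ehsSplitAtHeading]
    split_ifs <;> simp [ih]

theorem ehsSplit_snd_head (ic : Bool) (xs : List String) (l : String) (t : List String)
    (h : (ehsSplitAtHeading ic xs).2 = l :: t) : PySem.Str.startswith l "#" = true := by
  induction xs generalizing ic with
  | nil => simp [ehsSplitAtHeading] at h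
  | cons x rest ih =>
    simp only [ehsSplitAtHeading] at h
    split_ifs at h with h1 h2
    · exact ih _ h
    · obtain ⟨rfl, -⟩ : x = l ∧ rest = t := by simpa using h
      rw [Bool.and_eq_true] at h2
      exact h2.2
    · exact ih _ h

-- ---- A's loop vs the splitter ----

theorem foldA_split (xs : List String) (ic : Bool)
    (secs : List (String × String)) (c : List String) (sh : Option String) (hh : Bool)
    (ah : List String) : ∃ icF : Bool,
    List.foldl ehsStep (secs, c, sh, ic, hh, ah) xs
      = List.foldl ehsStep (secs, c ++ (ehsSplitAtHeading ic xs).1, sh, icF, hh, ah)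
          (ehsSplitAtHeading ic xs).2
    ∧ ((ehsSplitAtHeading ic xs).2 ≠ [] → icF = false) := by
  induction xs generalizing ic c with
  | nil => exact ⟨ic, by simp [ehsSplitAtHeading]⟩
  | cons l t ih =>
    by_cases h1 : (PySem.Str.strip l == "```") = true
    · have hsw := ehs_fence_not_hash l h1
      have hsw' : PySem.Chars.startswith l.toList ['#'] = false := by simpa using hsw
      have hsplit : ehsSplitAtHeading ic (l :: t)
          = (l :: (ehsSplitAtHeading (!ic) t).1, (ehsSplitAtHeading (!ic) t).2) := by
        simp only [ehsSplitAtHeading]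
        rw [if_pos h1]
      have hstep : ehsStep (secs, c, sh, ic, hh, ah) l = (secs, c ++ [l], sh, !ic, hh, ah) := by
        cases ic <;> simp [ehsStep, h1, hsw']
      obtain ⟨icF, he, hic⟩ := ih (!ic) (c ++ [l])
      refine ⟨icF, ?_, ?_⟩
      · rw [hsplit, List.foldl_cons, hstep, he]
        simp
      · rw [hsplit]; exact hic
    · by_cases h2 : (!ic && PySem.Str.startswith l "#") = true
      · rw [Bool.and_eq_true] at h2
        obtain ⟨hic0, hsw⟩ := h2
        have hsw' : PySem.Chars.startswith l.toList ['#'] = true := by simpa using hsw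
        have hic0 : ic = false := by simpa using hic0
        subst hic0
        have hsplit : ehsSplitAtHeading false (l :: t) = ([], l :: t) := by
          simp only [ehsSplitAtHeading]
          rw [if_neg h1, if_pos (show (!false && PySem.Str.startswith l "#") = true by simp [hsw'])]
        refine ⟨false, ?_, fun _ => rfl⟩
        rw [hsplit]
        simp
      · have hstep : ehsStep (secs, c, sh, ic, hh, ah) l = (secs, c ++ [l], sh, ic, hh, ah) := by
          cases ic with
          | false =>
            have hsw : PySem.Str.startswith l "#" = false := by
              revert h2; cases hx : PySem.Str.startswith l "#" <;> simp
            have hsw' : PySem.Chars.startswith l.toList ['#'] = false := by simpa using hsw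
            simp [ehsStep, h1, hsw']
          | true => simp [ehsStep, h1]
        have hsplit : ehsSplitAtHeading ic (l :: t)
            = (l :: (ehsSplitAtHeading ic t).1, (ehsSplitAtHeading ic t).2) := by
          simp only [ehsSplitAtHeading]
          rw [if_neg h1, if_neg (by simpa using h2)]
        obtain ⟨icF, he, hic⟩ := ih ic (c ++ [l])
        refine ⟨icF, ?_, ?_⟩
        · rw [hsplit, List.foldl_cons, hstep, he]
          simp
        · rw [hsplit]; exact hic

theorem foldA_hh (xs : List String)
    (st : List (String × String) × List String × Option String × Bool × Bool × List String)
    (h : st.2.2.2.2.1 = true) : (List.foldl ehsStep st xs).2.2.2.2.1 = true := by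
  induction xs generalizing st with
  | nil => simpa using h
  | cons l t ih =>
    rw [List.foldl_cons]
    apply ih
    obtain ⟨a, b, sh, d, e, f⟩ := st
    simp only at h
    subst h
    simp only [ehsStep]
    cases sh <;> split_ifs <;> simp

-- step of A at a heading line, from a clean (just-flushed) state
theorem ehsStep_heading (l : String) (h : PySem.Str.startswith l "#" = true)
    (secs : List (String × String)) (c : List String) (sh : Option String) (hh : Bool)
    (ah : List String) :
    ehsStep (secs, c, sh, false, hh, ah) l
      = (ehsFlush (secs, c, sh, false, hh, ah), [], some (ehsH l), false, true,
          match sh with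
          | some s => if s ≠ "" then ah ++ [s] else ah
          | none => ah) := by
  have h1 := ehs_hash_not_fence l h
  have h' : PySem.Chars.startswith l.toList ['#'] = true := by simpa using h
  cases sh with
  | none => simp [ehsStep, ehsFlush, ehsH, h1, h']
  | some s =>
    by_cases hs : s = "" <;> simp [ehsStep, ehsFlush, ehsH, ehsJ, h1, h', hs]

-- A's loop from the state just after reading a heading = B's section loop
theorem foldA_main (n : Nat) (xs : List String) (hn : xs.length ≤ n)
    (secs : List (String × String)) (h : String) (ah : List String) :
    ehsFlush (List.foldl ehsStep (secs, [], some h, false, true, ah) xs)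
      = secs ++ (if h ≠ "" then [(h, ehsJ (ehsSplitAtHeading false xs).1)] else [])
          ++ ehsLoop (ehsSplitAtHeading false xs).2 := by
  induction n generalizing xs secs h ah with
  | zero =>
    have hxs : xs = [] := List.length_eq_zero_iff.mp (Nat.le_zero.mp hn)
    subst hxs
    by_cases h0 : h = "" <;> simp [ehsSplitAtHeading, ehsLoop, ehsFlush, ehsJ, h0]
  | succ n ih =>
    obtain ⟨icF, he, hicF⟩ := foldA_split xs false secs [] (some h) true ah
    rcases hsuf : (ehsSplitAtHeading false xs).2 with - | ⟨l, t⟩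
    · rw [he, hsuf, List.foldl_nil]
      by_cases h0 : h = "" <;> simp [ehsLoop, ehsFlush, ehsJ, h0]
    · have hic0 := hicF (by rw [hsuf]; simp)
      subst hic0
      rw [he, hsuf, List.foldl_cons]
      have hsw := ehsSplit_snd_head false xs l t hsuf
      rw [ehsStep_heading l hsw]
      have hlen : t.length ≤ n := by
        have happ := ehsSplit_append false xs
        rw [hsuf] at happ
        have h3 := congrArg List.length happ
        simp at h3
        omega
      rw [ih t hlen _ (ehsH l) _]
      have hfl : ehsFlush (secs, [] ++ (ehsSplitAtHeading false xs).1, some h, false, true, ah)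
          = secs ++ (if h ≠ "" then [(h, ehsJ ((ehsSplitAtHeading false xs).1))] else []) := by
        by_cases h0 : h = "" <;> simp [ehsFlush, h0]
      rw [hfl]
      have hloop : ehsLoop (l :: t)
          = (if ehsH l ≠ "" then [(ehsH l, ehsJ (ehsSplitAtHeading false t).1)] else [])
              ++ ehsLoop (ehsSplitAtHeading false t).2 := by
        simp [ehsLoop, ehsH, ehsJ]
      rw [hloop]
      simp

-- ---- the final normalization pass of A is the identity on its sections ----

theorem ehs_dropWhile_head_false (p : Char → Bool) (l : List Char) (a : Char)
    (h : (l.dropWhile p).head? = some a) : p a = false := by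
  induction l with
  | nil => simp at h
  | cons x xs ih =>
    rw [List.dropWhile_cons] at h
    split at h
    · exact ih h
    · simp_all

theorem ehs_inter_cons (x y : List Char) (xs : List (List Char)) :
    List.intercalate ['\n'] (x :: y :: xs) = x ++ '\n' :: List.intercalate ['\n'] (y :: xs) := by
  induction xs generalizing x y <;> simp_all [List.intercalate, List.intersperse]

theorem ehs_inter_merge (X : List (List Char)) (a b : List Char) :
    List.intercalate ['\n'] (X ++ [a, b]) = List.intercalate ['\n'] (X ++ [a ++ '\n' :: b]) := by
  induction X with
  | nil => simp [List.intercalate, List.intersperse]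
  | cons x X ih =>
    cases X with
    | nil => simp [List.intercalate, List.intersperse]
    | cons x' X' =>
      simp only [List.cons_append, ehs_inter_cons]
      rw [← List.cons_append, ← List.cons_append, ih]

theorem ehs_go_join (isB : Char → Bool) (s cur : List Char) (acc : List (List Char)) :
    (∀ c ∈ s, c ≠ '\r') → (∀ c ∈ s, isB c = true → c = '\n') →
    ((s = [] ∧ cur ≠ []) ∨ (s ≠ [] ∧ s.getLast? ≠ some '\n')) →
    List.intercalate ['\n'] (PySem.Chars.splitlines.go isB s cur acc)
      = List.intercalate ['\n'] (acc.reverse ++ [cur.reverse ++ s]) := by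
  fun_induction PySem.Chars.splitlines.go isB s cur acc with
  | case1 cur acc hcur =>
    intro _ _ h3
    rcases h3 with ⟨-, hne⟩ | ⟨hne, -⟩
    · exact absurd (List.isEmpty_iff.mp hcur) hne
    · exact absurd rfl hne
  | case2 cur acc hcur =>
    intro _ _ _
    simp
  | case3 rest cur acc ih =>
    intro h1 _ _
    exact absurd rfl (h1 '\r' (by simp))
  | case4 c rest cur acc hguard hb ih =>
    intro h1 h2 h3
    have hc : c = '\n' := h2 c (by simp) hb
    subst hc
    have hne : rest ≠ [] := by
      rcases h3 with ⟨h, -⟩ | ⟨-, hlast⟩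
      · simp at h
      · intro hr; subst hr; simp at hlast
    have hlast : rest.getLast? ≠ some '\n' := by
      rcases h3 with ⟨h, -⟩ | ⟨-, hlast⟩
      · simp at h
      · obtain ⟨r, rs, rfl⟩ := List.exists_cons_of_ne_nil hne
        rwa [List.getLast?_cons_cons] at hlast
    rw [ih (fun d hd => h1 d (by simp [hd])) (fun d hd => h2 d (by simp [hd]))
      (Or.inr ⟨hne, hlast⟩)]
    have hm := ehs_inter_merge acc.reverse cur.reverse rest
    simp only [List.reverse_cons] at *
    rw [← hm]
    simp
  | case5 c rest cur acc hguard hb ih =>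
    intro h1 h2 h3
    have h3' : (rest = [] ∧ c :: cur ≠ []) ∨ (rest ≠ [] ∧ rest.getLast? ≠ some '\n') := by
      rcases eq_or_ne rest [] with hr | hr
      · exact Or.inl ⟨hr, by simp⟩
      · refine Or.inr ⟨hr, ?_⟩
        rcases h3 with ⟨h, -⟩ | ⟨-, hlast⟩
        · simp at h
        · obtain ⟨r, rs, rfl⟩ := List.exists_cons_of_ne_nil hr
          rwa [List.getLast?_cons_cons] at hlast
    rw [ih (fun d hd => h1 d (by simp [hd])) (fun d hd => h2 d (by simp [hd])) h3']
    simp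

theorem ehs_go_pieces (isB : Char → Bool) (s cur : List Char) (acc : List (List Char)) :
    (∀ c ∈ cur, isB c = false) → (∀ p ∈ acc, ∀ c ∈ p, isB c = false) →
    ∀ p ∈ PySem.Chars.splitlines.go isB s cur acc, ∀ c ∈ p, isB c = false := by
  fun_induction PySem.Chars.splitlines.go isB s cur acc with
  | case1 cur acc hcur =>
    intro hc hacc p hp
    exact hacc p (by simpa using hp)
  | case2 cur acc hcur =>
    intro hc hacc p hp
    rcases List.mem_cons.mp (List.mem_reverse.mp hp) with hp | hp
    · subst hp; intro c hcc; exact hc c (by simpa using hcc)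
    · exact hacc p hp
  | case3 rest cur acc ih =>
    intro hc hacc
    refine ih (by simp) ?_
    intro p hp
    rcases List.mem_cons.mp hp with hp | hp
    · subst hp; intro c hcc; exact hc c (by simpa using hcc)
    · exact hacc p hp
  | case4 c rest cur acc hguard hb ih =>
    intro hc hacc
    refine ih (by simp) ?_
    intro p hp
    rcases List.mem_cons.mp hp with hp | hp
    · subst hp; intro d hd; exact hc d (by simpa using hd)
    · exact hacc p hp
  | case5 c rest cur acc hguard hb ih =>
    intro hc hacc
    refine ih ?_ hacc
    intro d hd
    rcases List.mem_cons.mp hd with hd | hd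
    · subst hd; simpa using hb
    · exact hc d hd

theorem ehs_splitlines_pieces (cs : List Char) :
    ∀ p ∈ PySem.Chars.splitlines cs, ∀ c ∈ p, ehsIsB c = false :=
  ehs_go_pieces ehsIsB cs [] [] (by simp) (by simp)

theorem ehs_mem_intercalate (parts : List (List Char)) (c : Char)
    (h : c ∈ List.intercalate ['\n'] parts) : c = '\n' ∨ ∃ p ∈ parts, c ∈ p := by
  induction parts with
  | nil => simp [List.intercalate] at h
  | cons p ps ih =>
    cases ps with
    | nil =>
      right
      exact ⟨p, by simp, by simpa [List.intercalate, List.intersperse] using h⟩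
    | cons q qs =>
      rw [ehs_inter_cons] at h
      rcases List.mem_append.mp h with hp | hp
      · exact Or.inr ⟨p, by simp, hp⟩
      · rcases List.mem_cons.mp hp with hp | hp
        · exact Or.inl hp
        · rcases ih hp with hnl | ⟨r, hr, hcr⟩
          · exact Or.inl hnl
          · exact Or.inr ⟨r, by simp [List.mem_cons.mp hr], hcr⟩

theorem ehs_mem_strip (u : List Char) (c : Char) (h : c ∈ PySem.Chars.strip u) : c ∈ u := by
  have h1 : c ∈ PySem.Chars.lstrip u := List.IsPrefix.mem h (ehs_rstrip_prefix _)
  exact List.IsSuffix.mem h1 (List.dropWhile_suffix _)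

theorem ehs_lstrip_of_rstrip (v : List Char) :
    PySem.Chars.lstrip (PySem.Chars.rstrip (PySem.Chars.lstrip v))
      = PySem.Chars.rstrip (PySem.Chars.lstrip v) := by
  rcases hrs : PySem.Chars.rstrip (PySem.Chars.lstrip v) with - | ⟨a, w⟩
  · rfl
  · have hpre := ehs_rstrip_prefix (PySem.Chars.lstrip v)
    rw [hrs] at hpre
    have hhead := ehs_prefix_head hpre (by simp)
    have hl : (PySem.Chars.lstrip v).head? = some a := by
      rw [← hhead]; simp
    have ha : PySem.Chars.isspace a = false :=
      ehs_dropWhile_head_false _ _ _ (by simpa [PySem.Chars.lstrip] using hl)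
    simp [PySem.Chars.lstrip, ha]

theorem ehs_strip_idem (u : List Char) :
    PySem.Chars.strip (PySem.Chars.strip u) = PySem.Chars.strip u := by
  show PySem.Chars.rstrip (PySem.Chars.lstrip (PySem.Chars.rstrip (PySem.Chars.lstrip u)))
      = PySem.Chars.rstrip (PySem.Chars.lstrip u)
  rw [ehs_lstrip_of_rstrip]
  simp [PySem.Chars.rstrip, List.dropWhile_idempotent]

theorem ehs_strip_last (u : List Char) (c : Char)
    (h : (PySem.Chars.strip u).getLast? = some c) : PySem.Chars.isspace c = false := by
  have : (List.dropWhile PySem.Chars.isspace (PySem.Chars.lstrip u).reverse).head? = some c := by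
    rw [← List.getLast?_reverse]
    simpa [PySem.Chars.strip, PySem.Chars.rstrip] using h
  exact ehs_dropWhile_head_false _ _ _ this

theorem ehs_norm_chars (parts : List (List Char))
    (hp : ∀ p ∈ parts, ∀ c ∈ p, ehsIsB c = false) :
    PySem.Chars.strip (PySem.Chars.join ['\n'] (PySem.Chars.splitlines
        (PySem.Chars.strip (PySem.Chars.join ['\n'] parts))))
      = PySem.Chars.strip (PySem.Chars.join ['\n'] parts) := by
  rcases hs : PySem.Chars.strip (PySem.Chars.join ['\n'] parts) with - | ⟨a, s'⟩
  · rfl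
  · set s := a :: s' with hs'
    have hmem : ∀ c ∈ s, c ∈ PySem.Chars.join ['\n'] parts := by
      intro c hc
      exact ehs_mem_strip _ c (hs ▸ hc)
    have hr : ∀ c ∈ s, c ≠ '\r' := by
      intro c hc
      rcases ehs_mem_intercalate parts c (hmem c hc) with h | ⟨p, hpp, hcp⟩
      · subst h; decide
      · intro hcr
        subst hcr
        have := hp p hpp '\r' hcp
        simp [ehsIsB] at this
    have hnl : ∀ c ∈ s, ehsIsB c = true → c = '\n' := by
      intro c hc hb
      rcases ehs_mem_intercalate parts c (hmem c hc) with h | ⟨p, hpp, hcp⟩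
      · exact h
      · rw [hp p hpp c hcp] at hb
        exact absurd hb (by simp)
    have hlast : s.getLast? ≠ some '\n' := by
      intro hl
      have := ehs_strip_last _ _ (hs ▸ hl)
      simp [PySem.Chars.isspace] at this
    have hgo : List.intercalate ['\n'] (PySem.Chars.splitlines.go ehsIsB s [] [])
        = s := by
      rw [ehs_go_join ehsIsB s [] [] hr hnl (Or.inr ⟨by simp [hs'], hlast⟩)]
      simp [List.intercalate]
    have hsplit : PySem.Chars.join ['\n'] (PySem.Chars.splitlines s) = s := by
      show List.intercalate ['\n'] (PySem.Chars.splitlines.go ehsIsB s [] []) = s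
      exact hgo
    rw [hsplit, ← hs]
    exact ehs_strip_idem _

theorem ehs_norm_noop (parts : List String)
    (hp : ∀ p ∈ parts, ∀ c ∈ p.toList, ehsIsB c = false) :
    PySem.Str.strip (PySem.Str.join "\n" (PySem.Str.splitlines
        (PySem.Str.strip (PySem.Str.join "\n" parts))))
      = PySem.Str.strip (PySem.Str.join "\n" parts) := by
  have hid : String.toList ∘ String.ofList = fun l : List Char => l :=
    funext fun l => String.toList_ofList
  have hnl : "\n".toList = ['\n'] := rfl
  simp only [PySem.Str.strip, PySem.Str.join, PySem.Str.splitlines, String.toList_ofList,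
    List.map_map, hid, List.map_id', hnl]
  refine congrArg String.ofList (ehs_norm_chars (parts.map String.toList) ?_)
  intro p hpp c hc
  obtain ⟨q, hq, rfl⟩ := List.mem_map.mp hpp
  exact hp q hq c hc

theorem ehs_lines_nonbreak (content : String) :
    ∀ l ∈ PySem.Str.splitlines content, ∀ c ∈ l.toList, ehsIsB c = false := by
  intro l hl c hc
  simp only [PySem.Str.splitlines, List.mem_map] at hl
  obtain ⟨q, hq, rfl⟩ := hl
  rw [String.toList_ofList] at hc
  exact ehs_splitlines_pieces content.toList q hq c hc

theorem ehs_loop_unfold (l : String) (t : List String) :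
    ehsLoop (l :: t)
      = (if ehsH l ≠ "" then [(ehsH l, ehsJ (ehsSplitAtHeading false t).1)] else [])
          ++ ehsLoop (ehsSplitAtHeading false t).2 := by
  simp [ehsLoop, ehsH, ehsJ]

theorem ehs_loop_norm (n : Nat) (rest : List String) (hn : rest.length ≤ n)
    (hm : ∀ l ∈ rest, ∀ c ∈ l.toList, ehsIsB c = false) :
    (ehsLoop rest).map
        (fun p => (p.1, PySem.Str.strip (PySem.Str.join "\n" (PySem.Str.splitlines p.2))))
      = ehsLoop rest := by
  induction n generalizing rest with
  | zero =>
    have : rest = [] := List.length_eq_zero_iff.mp (Nat.le_zero.mp hn)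
    subst this
    simp [ehsLoop]
  | succ n ih =>
    cases rest with
    | nil => simp [ehsLoop]
    | cons l t =>
      have happ := ehsSplit_append false t
      have hmemf : ∀ x ∈ (ehsSplitAtHeading false t).1, x ∈ t := fun x hx => by
        rw [← happ]; exact List.mem_append.mpr (Or.inl hx)
      have hmems : ∀ x ∈ (ehsSplitAtHeading false t).2, x ∈ t := fun x hx => by
        rw [← happ]; exact List.mem_append.mpr (Or.inr hx)
      have hlen : (ehsSplitAtHeading false t).2.length ≤ n := by
        have h1 := ehsSplit_len false t
        simp only [List.length_cons] at hn
        omega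
      have hrec := ih (ehsSplitAtHeading false t).2 hlen
        (fun x hx => hm x (List.mem_cons_of_mem l (hmems x hx)))
      have hbody : PySem.Str.strip (PySem.Str.join "\n" (PySem.Str.splitlines
          (ehsJ (ehsSplitAtHeading false t).1))) = ehsJ (ehsSplitAtHeading false t).1 := by
        simp only [ehsJ]
        exact ehs_norm_noop _ (fun p hp c hc =>
          hm p (List.mem_cons_of_mem l (hmemf p hp)) c hc)
      rw [ehs_loop_unfold, List.map_append, hrec]
      have hfst : List.map
          (fun p => (p.1, PySem.Str.strip (PySem.Str.join "\n" (PySem.Str.splitlines p.2))))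
          (if ehsH l ≠ "" then [(ehsH l, ehsJ (ehsSplitAtHeading false t).1)] else [])
          = (if ehsH l ≠ "" then [(ehsH l, ehsJ (ehsSplitAtHeading false t).1)] else []) := by
        by_cases h0 : ehsH l = ""
        · simp [h0]
        · simp [h0, hbody]
      rw [hfst]

-- A's output, written with the post-loop flush made explicit
theorem ehs_portA (title description content : String) :
    extract_heading_sections title description content
      = (if (List.foldl ehsStep ([], [], none, false, false, [])
              (PySem.Str.splitlines content)).2.2.2.2.1 = true
         then ehsFlush (List.foldl ehsStep ([], [], none, false, false, [])
                (PySem.Str.splitlines content))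
         else ehsFlush (List.foldl ehsStep ([], [], none, false, false, [])
                (PySem.Str.splitlines content))
              ++ [(title ++ " " ++ description,
                    PySem.Str.strip (PySem.Str.join "\n" (PySem.Str.splitlines content)))]).map
        (fun p => (p.1, PySem.Str.strip (PySem.Str.join "\n" (PySem.Str.splitlines p.2)))) := by
  simp only [extract_heading_sections]
  generalize List.foldl ehsStep ([], [], none, false, false, [])
    (PySem.Str.splitlines content) = st
  obtain ⟨a, b, c3, d4, e5, f6⟩ := st
  cases c3 <;> cases e5 <;> simp [ehsFlush, ehsJ]

-- ===== VERDICT (by name: the statement is the Claim_ definition above) =====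
theorem extract_heading_sections_spec : Claim_equal_extract_heading_sections := by
  unfold Claim_equal_extract_heading_sections
  intro title description content _
  unfold Spec_extract_heading_sections
  rw [ehs_portA]
  obtain ⟨icF, he, hicF⟩ :=
    foldA_split (PySem.Str.splitlines content) false [] [] none false []
  rcases hsuf : (ehsSplitAtHeading false (PySem.Str.splitlines content)).2 with - | ⟨l, t⟩
  · -- no heading anywhere: A falls back to (title+' '+description, whole text)
    rw [hsuf, List.foldl_nil] at he
    rw [he]
    simp only [extract_heading_sections_alt, hsuf, ehsFlush]
    simp [ehs_norm_noop (PySem.Str.splitlines content) (ehs_lines_nonbreak content)]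
  · -- at least one heading
    have hic0 : icF = false := hicF (by rw [hsuf]; simp)
    subst hic0
    rw [hsuf, List.foldl_cons] at he
    have hsw := ehsSplit_snd_head false (PySem.Str.splitlines content) l t hsuf
    rw [ehsStep_heading l hsw] at he
    simp only [ehsFlush] at he
    rw [he]
    have hhh := foldA_hh t ([], [], some (ehsH l), false, true, []) rfl
    rw [if_pos hhh]
    rw [foldA_main t.length t le_rfl [] (ehsH l) []]
    rw [List.nil_append, ← ehs_loop_unfold]
    have hmem : ∀ x ∈ l :: t, ∀ c ∈ x.toList, ehsIsB c = false := by
      intro x hx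
      have happ := ehsSplit_append false (PySem.Str.splitlines content)
      rw [hsuf] at happ
      exact ehs_lines_nonbreak content x (by rw [← happ]; exact List.mem_append.mpr (Or.inr hx))
    rw [ehs_loop_norm (l :: t).length (l :: t) le_rfl hmem]
    simp only [extract_heading_sections_alt, hsuf]
    simp
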